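-- pv_equiv track=rewrite | github.com/akashdeep2001/cs20-class-demos-fall2017 | period1/string_manipulation_for_chauncey.py | build_bottom_row
-- ===== SOURCE A (Python) =====
-- def build_bottom_row(x_cor):
--     bottom_row_string = ""
--     for i in range(5):
--         if i == x_cor:
--             bottom_row_string = bottom_row_string + "9"
--         else:
--             bottom_row_string = bottom_row_string + "0"
--     return bottom_row_string
--
-- x_cor = 3
-- ===== SOURCE B (Python) =====
-- def build_bottom_row(x_cor):
--     if x_cor in range(5):
--         pos = int(x_cor)
--         return "0" * pos + "9" + "0" * (4 - pos)
--     return "00000"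
-- ===== Notes on version B (the rewrite author's own statement) =====
-- stated objective: simpler
-- what changed: Replaces the 5-iteration character-append loop with a closed-form construction: a range membership test followed by direct string repetition and concatenation.
import Mathlib
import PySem

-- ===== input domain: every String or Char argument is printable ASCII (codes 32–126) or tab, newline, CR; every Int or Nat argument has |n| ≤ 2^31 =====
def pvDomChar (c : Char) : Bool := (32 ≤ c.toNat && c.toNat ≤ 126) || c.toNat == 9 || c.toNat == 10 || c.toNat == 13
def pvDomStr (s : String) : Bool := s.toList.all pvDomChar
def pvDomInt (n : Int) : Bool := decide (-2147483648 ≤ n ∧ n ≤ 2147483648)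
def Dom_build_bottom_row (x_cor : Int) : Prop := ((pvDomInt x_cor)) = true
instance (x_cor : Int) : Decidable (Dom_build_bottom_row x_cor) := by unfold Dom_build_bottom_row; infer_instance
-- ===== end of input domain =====

-- B replaces A's 5-step append loop with a closed-form string construction (simpler).


-- ===== PORT A =====
-- Port of A: fold over range(5), appending "9" when i == x_cor else "0".
def build_bottom_row (x_cor : Int) : String :=
  (PySem.List.pyRange 0 5 1).foldl
    (fun s i => if i == x_cor then s ++ "9" else s ++ "0") ""

-- ===== PORT B =====
-- Port of B: closed form — range test, then repeated-zero concatenation.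
def build_bottom_row_alt (x_cor : Int) : String :=
  if 0 ≤ x_cor ∧ x_cor < 5 then
    let pos := x_cor.toNat
    String.ofList (List.replicate pos '0') ++ "9" ++ String.ofList (List.replicate (4 - pos) '0')
  else "00000"

-- ===== PRECONDITION & SPEC =====
def Spec_build_bottom_row (x_cor : Int) (out : String) : Prop := out = build_bottom_row_alt x_cor
instance (x_cor : Int) (out : String) : Decidable (Spec_build_bottom_row x_cor out) := by unfold Spec_build_bottom_row; infer_instance

-- ===== CLAIM (what is proved, stated in full; the proofs are below) =====
def Claim_equal_build_bottom_row : Prop := ∀ (x_cor : Int), Dom_build_bottom_row x_cor → Spec_build_bottom_row x_cor (build_bottom_row x_cor)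

-- ===== LEMMAS AND PROOFS =====

-- ===== VERDICT (by name: the statement is the Claim_ definition above) =====
theorem build_bottom_row_spec : Claim_equal_build_bottom_row := by
  intro x _
  unfold Spec_build_bottom_row build_bottom_row build_bottom_row_alt
  by_cases h0 : x = 0; · subst h0; decide
  by_cases h1 : x = 1; · subst h1; decide
  by_cases h2 : x = 2; · subst h2; decide
  by_cases h3 : x = 3; · subst h3; decide
  by_cases h4 : x = 4; · subst h4; decide
  have hout : ¬ (0 ≤ x ∧ x < 5) := by omega
  have hr : PySem.List.pyRange 0 5 1 = [0, 1, 2, 3, 4] := by decide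
  rw [if_neg hout, hr]
  simp only [List.foldl, beq_iff_eq]
  split_ifs <;> first | decide | omega
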